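-- pv_equiv track=rewrite | github.com/RohitSadanand45/Trust_Wi | packet_monitor.py | is_malware_ip
-- ===== SOURCE A (Python) =====
-- MALWARE_IPS = {
--     '185.176.27.0/24',
--     '45.155.205.0/24',
--     '91.92.109.43',
--     '185.130.5.0/24',
-- }
--
-- def is_malware_ip(ip):
--     for malware_range in MALWARE_IPS:
--         if '/' in malware_range:
--             prefix = malware_range.split('/')[0]
--             if ip.startswith(prefix):
--                 return True
--         elif ip == malware_range:
--             return True
--     return False
-- ===== SOURCE B (Python) =====
-- MALWARE_IPS = {
--     '185.176.27.0/24',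
--     '45.155.205.0/24',
--     '91.92.109.43',
--     '185.130.5.0/24',
-- }
--
-- _EXACTS = frozenset(e for e in MALWARE_IPS if '/' not in e)
-- _PREFIXES = frozenset(e.split('/')[0] for e in MALWARE_IPS if '/' in e)
-- _LENS = sorted({len(p) for p in _PREFIXES})
--
-- def is_malware_ip(ip):
--     # Instead of scanning the table, slice the INPUT at each distinct prefix
--     # length and hash-look the slice up; one more hash lookup for exact IPs.
--     return ip in _EXACTS or any(ip[:n] in _PREFIXES for n in _LENS)
-- ===== Notes on version B (the rewrite author's own statement) =====
-- stated objective: alternative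
-- what changed: A scans the table entry by entry with an inner slash-branch and per-entry startswith/equality tests; B inverts the traversal: it pre-splits the table once into hash sets of exact IPs and CIDR prefixes, and at call time slices the INPUT at each distinct prefix length and hash-looks the slice up (plus one exact-set lookup), so no entry of the table is scanned and no startswith is used.
import Mathlib
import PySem

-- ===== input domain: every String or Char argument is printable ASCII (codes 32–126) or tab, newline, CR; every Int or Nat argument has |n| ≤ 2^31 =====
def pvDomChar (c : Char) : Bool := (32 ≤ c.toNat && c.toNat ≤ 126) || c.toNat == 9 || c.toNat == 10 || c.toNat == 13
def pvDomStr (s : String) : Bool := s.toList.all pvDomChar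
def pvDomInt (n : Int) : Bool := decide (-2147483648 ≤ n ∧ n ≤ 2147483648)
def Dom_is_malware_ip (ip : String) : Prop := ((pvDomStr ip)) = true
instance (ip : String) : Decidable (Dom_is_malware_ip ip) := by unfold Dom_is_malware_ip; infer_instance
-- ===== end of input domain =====

-- B inverts A's traversal: the table is pre-split once into hash sets of exact IPs and of CIDR
-- prefixes, and at call time the INPUT is sliced at each distinct prefix length and the slice is
-- looked up in the prefix set (no per-entry scan, no startswith); alternative, same cost here.

-- ===== PORT A =====
-- the set literal MALWARE_IPS (distinct elements, source order; the loop's boolean result is order-independent)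
def MALWARE_IPS : List String :=
  PySem.Set.ofList ["185.176.27.0/24", "45.155.205.0/24", "91.92.109.43", "185.130.5.0/24"]

-- the for-loop with early return, as structural recursion over the set's elements
def is_malware_ip_go (ip : String) : List String → Bool
  | [] => false
  | malware_range :: rest =>
    if PySem.Str.isIn "/" malware_range then
      let pfx := (((PySem.Str.split? malware_range "/").getD []).headD "")  -- split('/')[0]
      if PySem.Str.startswith ip pfx then true else is_malware_ip_go ip rest
    else if ip == malware_range then true
    else is_malware_ip_go ip rest

def is_malware_ip (ip : String) : Bool := is_malware_ip_go ip MALWARE_IPS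

-- ===== PORT B =====
-- Source B's module-level pre-computation: exact-IP set, prefix set, distinct prefix lengths (sorted)
def pvExacts : List String :=
  PySem.Set.ofList (MALWARE_IPS.filter (fun e => !(PySem.Str.isIn "/" e)))
def pvPrefixes : List String :=
  PySem.Set.ofList ((MALWARE_IPS.filter (fun e => PySem.Str.isIn "/" e)).map
    (fun e => ((PySem.Str.split? e "/").getD []).headD ""))
def pvLens : List Int :=
  PySem.List.sorted (PySem.Set.ofList (pvPrefixes.map PySem.Str.len)) (fun n => n)

-- Source B's body: one exact-set lookup, then per distinct length a lookup of the input's slice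
def is_malware_ip_alt (ip : String) : Bool :=
  pvExacts.contains ip ||
    pvLens.any (fun n => pvPrefixes.contains (PySem.Str.slice ip none (some n)))

-- ===== PRECONDITION & SPEC =====
def Spec_is_malware_ip (ip : String) (out : Bool) : Prop := out = is_malware_ip_alt ip
instance (ip : String) (out : Bool) : Decidable (Spec_is_malware_ip ip out) := by unfold Spec_is_malware_ip; infer_instance

-- ===== CLAIM (what is proved, stated in full; the proofs are below) =====
def Claim_equal_is_malware_ip : Prop := ∀ (ip : String), Dom_is_malware_ip ip → Spec_is_malware_ip ip (is_malware_ip ip)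

-- ===== LEMMAS AND PROOFS =====
theorem pv_A_eval (ip : String) :
    is_malware_ip ip =
      (PySem.Str.startswith ip "185.176.27.0" ||
       (PySem.Str.startswith ip "45.155.205.0" ||
        ((ip == "91.92.109.43") || PySem.Str.startswith ip "185.130.5.0"))) := by
  show is_malware_ip_go ip MALWARE_IPS = _
  have hM : MALWARE_IPS = ["185.176.27.0/24", "45.155.205.0/24", "91.92.109.43", "185.130.5.0/24"] := by decide
  rw [hM]
  simp only [is_malware_ip_go,
    show PySem.Str.isIn "/" "185.176.27.0/24" = true from by decide,
    show PySem.Str.isIn "/" "45.155.205.0/24" = true from by decide,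
    show PySem.Str.isIn "/" "91.92.109.43" = false from by decide,
    show PySem.Str.isIn "/" "185.130.5.0/24" = true from by decide,
    show (((PySem.Str.split? "185.176.27.0/24" "/").getD []).headD "") = "185.176.27.0" from by decide,
    show (((PySem.Str.split? "45.155.205.0/24" "/").getD []).headD "") = "45.155.205.0" from by decide,
    show (((PySem.Str.split? "185.130.5.0/24" "/").getD []).headD "") = "185.130.5.0" from by decide,
    if_true]
  cases PySem.Str.startswith ip "185.176.27.0" <;>
  cases PySem.Str.startswith ip "45.155.205.0" <;>
  cases (ip == "91.92.109.43") <;>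
  cases PySem.Str.startswith ip "185.130.5.0" <;> simp

-- a length-n prefix set lookup of ip[:n] is exactly startswith (specific to B's mechanism)
theorem pv_slice_beq (ip p : String) (n : Nat) (h : p.toList.length = n) :
    (PySem.Str.slice ip none (some (n : Int)) == p) = PySem.Str.startswith ip p := by
  have hs : (PySem.Str.slice ip none (some (n : Int))).toList = ip.toList.take n := by
    rw [PySem.Str.toList_slice, PySem.Chars.slice_eq_listSlice, PySem.List.slice_to_natCast]
  rw [Bool.eq_iff_iff, beq_iff_eq, PySem.Str.startswith_eq, PySem.Chars.startswith_iff,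
      List.prefix_iff_eq_take, h]
  constructor
  · intro he; rw [← he, hs]
  · intro he; exact String.toList_injective (by rw [hs, he])

-- a prefix longer than n can never equal ip[:n] (B's shorter-length bucket rejects it)
theorem pv_slice_beq_gt (ip p : String) (n : Nat) (h : n < p.toList.length) :
    (PySem.Str.slice ip none (some (n : Int)) == p) = false := by
  have hs : (PySem.Str.slice ip none (some (n : Int))).toList = ip.toList.take n := by
    rw [PySem.Str.toList_slice, PySem.Chars.slice_eq_listSlice, PySem.List.slice_to_natCast]
  rw [beq_eq_false_iff_ne]
  intro he
  have hlen := congrArg List.length (congrArg String.toList he.symm)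
  rw [hs, List.length_take] at hlen
  omega

-- the only extra disjunct B's 12-bucket adds for the 11-char prefix implies its startswith
theorem pv_beq_slice_imp (ip : String) :
    (PySem.Str.slice ip none (some 12) == "185.130.5.0") = true →
      PySem.Str.startswith ip "185.130.5.0" = true := by
  intro h
  rw [beq_iff_eq] at h
  have hs : (PySem.Str.slice ip none (some (12 : Int))).toList = ip.toList.take 12 := by
    rw [show (12 : Int) = ((12 : Nat) : Int) from by norm_num, PySem.Str.toList_slice,
        PySem.Chars.slice_eq_listSlice, PySem.List.slice_to_natCast]
  rw [PySem.Str.startswith_eq, PySem.Chars.startswith_iff, ← h, hs]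
  exact List.take_prefix 12 ip.toList

theorem pv_B_eval (ip : String) :
    is_malware_ip_alt ip =
      ((ip == "91.92.109.43") ||
       (PySem.Str.startswith ip "185.130.5.0" ||
        (PySem.Str.startswith ip "185.176.27.0" ||
         (PySem.Str.startswith ip "45.155.205.0" ||
          (PySem.Str.slice ip none (some 12) == "185.130.5.0"))))) := by
  have hE : pvExacts = ["91.92.109.43"] := by decide
  have hP : pvPrefixes = ["185.176.27.0", "45.155.205.0", "185.130.5.0"] := by decide
  have hL : pvLens = [(11 : Int), (12 : Int)] := by decide
  have h11 : ((11 : Nat) : Int) = (11 : Int) := by norm_num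
  have h12 : ((12 : Nat) : Int) = (12 : Int) := by norm_num
  simp only [is_malware_ip_alt, hE, hP, hL, List.any_cons, List.any_nil, List.contains_cons,
    List.contains_nil, Bool.or_false, ← h11, ← h12,
    pv_slice_beq ip "185.130.5.0" 11 (by decide),
    pv_slice_beq ip "185.176.27.0" 12 (by decide),
    pv_slice_beq ip "45.155.205.0" 12 (by decide),
    pv_slice_beq_gt ip "185.176.27.0" 11 (by decide),
    pv_slice_beq_gt ip "45.155.205.0" 11 (by decide)]
  cases (ip == "91.92.109.43") <;>
  cases PySem.Str.startswith ip "185.130.5.0" <;>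
  cases PySem.Str.startswith ip "185.176.27.0" <;>
  cases PySem.Str.startswith ip "45.155.205.0" <;> simp

-- ===== VERDICT (by name: the statement is the Claim_ definition above) =====
theorem is_malware_ip_spec : Claim_equal_is_malware_ip := by
  intro ip _
  show is_malware_ip ip = is_malware_ip_alt ip
  have hx := pv_beq_slice_imp ip
  rw [pv_A_eval, pv_B_eval]
  cases h : (PySem.Str.slice ip none (some 12) == "185.130.5.0")
  · cases PySem.Str.startswith ip "185.176.27.0" <;>
    cases PySem.Str.startswith ip "45.155.205.0" <;>
    cases (ip == "91.92.109.43") <;>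
    cases PySem.Str.startswith ip "185.130.5.0" <;> simp
  · rw [hx h]
    cases PySem.Str.startswith ip "185.176.27.0" <;>
    cases PySem.Str.startswith ip "45.155.205.0" <;>
    cases (ip == "91.92.109.43") <;> simp
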